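-- pv_equiv track=rewrite | github.com/lancelot291/algorithms-level-4 | 2025-01-24/67_pass-between-two.py | solution_0
-- ===== SOURCE A (Python) =====
-- def solution_0(s, skip, index):
--     s_new = []
--     for ch in s:
--         i = 0
--         while 1:
--             if chr((ord(ch) + 1 - ord('a'))%26 + ord('a')) not in skip:
--                 ch = chr((ord(ch) + 1 - ord('a'))%26 + ord('a'))
--                 i+=1
--             else:
--                 ch = chr((ord(ch) + 1 - ord('a'))%26 + ord('a'))
--             if i == index:
--                 break
--         s_new.append(ch)
--
--     return "".join(s_new)
-- ===== SOURCE B (Python) =====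
-- def solution_0(s, skip, index):
--     # Precompute the allowed letter positions once; each output char is then a
--     # direct modular lookup instead of stepping `index` times around the alphabet.
--     allowed = [q for q in range(26) if chr(q + ord('a')) not in skip]
--     m = len(allowed)
--     out = []
--     for ch in s:
--         p = (ord(ch) + 1 - ord('a')) % 26
--         j = sum(1 for q in allowed if q < p)
--         out.append(chr(allowed[(j + index - 1) % m] + ord('a')))
--     return "".join(out)
-- ===== Notes on version B (the rewrite author's own statement) =====
-- stated objective: faster
-- what changed: B precomputes the 26-letter allowed set once and replaces A's per-character walk of `index` cyclic steps by a single modular lookup allowed[(rank(p) + index - 1) % len(allowed)] per character.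
-- outside the precondition, e.g. on solution_0('a', 'b', 0): A returns 'b', B returns 'a'
import Mathlib
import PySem

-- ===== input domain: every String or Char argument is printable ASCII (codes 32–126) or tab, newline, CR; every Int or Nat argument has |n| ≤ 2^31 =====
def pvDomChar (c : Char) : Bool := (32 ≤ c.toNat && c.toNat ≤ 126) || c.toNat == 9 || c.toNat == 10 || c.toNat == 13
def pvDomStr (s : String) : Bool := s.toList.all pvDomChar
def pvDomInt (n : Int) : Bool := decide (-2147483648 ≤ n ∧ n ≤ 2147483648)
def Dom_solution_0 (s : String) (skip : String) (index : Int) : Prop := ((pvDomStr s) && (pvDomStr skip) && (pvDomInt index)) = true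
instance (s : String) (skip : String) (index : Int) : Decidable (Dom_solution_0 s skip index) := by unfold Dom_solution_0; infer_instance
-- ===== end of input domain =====

-- B precomputes the allowed letters once and uses one modular lookup per character,
-- replacing A's per-character walk of `index` cyclic steps (objective: faster).

-- ===== PORT A =====
-- chr((ord(ch) + 1 - ord('a')) % 26 + ord('a'))
def pyShift (ch : Char) : Char :=
  Char.ofNat ((PySem.Int.mod ((ch.toNat : Int) + 1 - 97) 26 + 97).toNat)

-- the `while 1:` body; fuel bounds the number of iterations (inside Pre_ the loop
-- terminates within the fuel supplied by solution_0; outside Pre_ Python A diverges)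
def loopA (skip : String) (index : Int) : Char → Int → Nat → Char
  | ch, _, 0 => ch
  | ch, i, fuel+1 =>
    let ch' := pyShift ch
    let i' := if PySem.Chars.isIn [ch'] skip.toList then i else i + 1
    if i' = index then ch' else loopA skip index ch' i' fuel

def solution_0 (s : String) (skip : String) (index : Int) : String :=
  let s_new := s.toList.foldl
    (fun acc ch => acc ++ [loopA skip index ch 0 (26 * index.toNat + 26)]) []
  String.mk (PySem.Chars.join [] (s_new.map ([·])))

-- ===== PORT B =====
-- allowed = [q for q in range(26) if chr(q + ord('a')) not in skip]
def allowedList (skip : String) : List Nat :=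
  (List.range 26).filter (fun q => !(PySem.Chars.isIn [Char.ofNat (q + 97)] skip.toList))

def solution_0_alt (s : String) (skip : String) (index : Int) : String :=
  let allowed := allowedList skip
  let m : Int := (allowed.length : Int)
  let out := s.toList.foldl (fun acc ch =>
    let p : Int := PySem.Int.mod ((ch.toNat : Int) + 1 - 97) 26
    let j : Int := ((allowed.filter (fun q : Nat => decide ((q : Int) < p))).length : Int)
    acc ++ [Char.ofNat ((PySem.List.pyGet? allowed (PySem.Int.mod (j + index - 1) m)).getD 0 + 97)]) []
  String.mk (PySem.Chars.join [] (out.map ([·])))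

-- ===== PRECONDITION & SPEC =====
-- Pre_ excludes index ≤ 0 and the case where all 26 letters occur in skip (with s
-- nonempty): there Python A loops forever, except the accidental corner index == 0
-- with the cyclic successor lying in skip, where A's returned skip-letter is an
-- artefact of checking `i == index` before any counting step has happened.
def Pre_solution_0 (s : String) (skip : String) (index : Int) : Prop :=
  s = "" ∨ (1 ≤ index ∧ ∃ q ∈ List.range 26, Char.ofNat (q + 97) ∉ skip.toList)
instance (s : String) (skip : String) (index : Int) : Decidable (Pre_solution_0 s skip index) := by
  unfold Pre_solution_0; infer_instance

def pvWitness_solution_0 : String × String × Int := ("ab", "xy", 2)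

def Spec_solution_0 (s : String) (skip : String) (index : Int) (out : String) : Prop :=
  out = solution_0_alt s skip index
instance (s : String) (skip : String) (index : Int) (out : String) : Decidable (Spec_solution_0 s skip index out) := by
  unfold Spec_solution_0; infer_instance

-- ===== CLAIM (what is proved, stated in full; the proofs are below) =====
def Claim_equal_solution_0 : Prop := ∀ (s : String) (skip : String) (index : Int),
  Dom_solution_0 s skip index → Pre_solution_0 s skip index →
  Spec_solution_0 s skip index (solution_0 s skip index)

-- ===== LEMMAS AND PROOFS =====

-- the allowed-letter predicate on alphabet positions 0..25
def aP (skip : String) (q : Nat) : Bool :=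
  !(PySem.Chars.isIn [Char.ofNat (q + 97)] skip.toList)

-- position of the cyclic successor of ch
def pPos (ch : Char) : Nat := (PySem.Int.mod ((ch.toNat : Int) + 1 - 97) 26).toNat

-- number of allowed positions < p
def jcnt (skip : String) (p : Nat) : Nat := ((List.range p).filter (aP skip)).length

-- the value B computes for successor position p and remaining count k
def FVal (skip : String) (p k : Nat) : Nat :=
  ((allowedList skip)[(jcnt skip p + k - 1) % (allowedList skip).length]?).getD 0

lemma aP_iff (skip : String) (q : Nat) :
    aP skip q = true ↔ Char.ofNat (q + 97) ∉ skip.toList := by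
  unfold aP
  rw [Bool.not_eq_eq_eq_not, Bool.not_true, ← Bool.not_eq_true,
    PySem.Chars.isIn_iff_infix, List.singleton_infix_iff]

lemma toNat_ofNat_letter (p : Nat) (hp : p < 26) : (Char.ofNat (p + 97)).toNat = p + 97 := by
  interval_cases p <;> decide

lemma pPos_lt (ch : Char) : pPos ch < 26 := by
  unfold pPos
  have h1 := PySem.Int.mod_nonneg ((ch.toNat : Int) + 1 - 97) (b := 26) (by omega)
  have h2 := PySem.Int.mod_lt ((ch.toNat : Int) + 1 - 97) (b := 26) (by omega)
  omega

lemma pyShift_eq (ch : Char) : pyShift ch = Char.ofNat (pPos ch + 97) := by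
  unfold pyShift pPos
  have h1 := PySem.Int.mod_nonneg ((ch.toNat : Int) + 1 - 97) (b := 26) (by omega)
  congr 1
  omega

lemma pPos_ofNat_letter (p : Nat) (hp : p < 26) :
    pPos (Char.ofNat (p + 97)) = (p + 1) % 26 := by
  unfold pPos
  rw [toNat_ofNat_letter p hp]
  have h : (((p + 97 : Nat) : Int) + 1 - 97) = ((p + 1 : Nat) : Int) := by push_cast; ring
  rw [h]
  have h26 : (26 : Int) = ((26 : Nat) : Int) := rfl
  rw [h26, PySem.Int.mod_natCast]
  exact Int.toNat_natCast _

-- allowedList decomposes at any p ≤ 26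
lemma allowedList_decomp (skip : String) (p : Nat) (hp : p ≤ 26) :
    allowedList skip
      = (List.range p).filter (aP skip)
        ++ ((List.range (26 - p)).map (p + ·)).filter (aP skip) := by
  have hr : List.range 26 = List.range p ++ (List.range (26 - p)).map (p + ·) := by
    conv_lhs => rw [show (26 : Nat) = p + (26 - p) from by omega]
    exact List.range_add
  show (List.range 26).filter (aP skip) = _
  rw [hr, List.filter_append]

lemma jcnt_le (skip : String) (p : Nat) (hp : p ≤ 26) :
    jcnt skip p ≤ (allowedList skip).length := by
  rw [allowedList_decomp skip p hp, List.length_append]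
  exact Nat.le_add_right _ _

lemma jcnt_succ (skip : String) (p : Nat) :
    jcnt skip (p + 1) = jcnt skip p + (if aP skip p then 1 else 0) := by
  unfold jcnt
  rw [List.range_succ, List.filter_append, List.length_append]
  by_cases h : aP skip p <;> simp [h]

lemma jcnt_26 (skip : String) : jcnt skip 26 = (allowedList skip).length := rfl

-- the element of allowedList at position jcnt p is p itself, when p is allowed
lemma allowedList_get_jcnt (skip : String) (p : Nat) (hp : p < 26) (hP : aP skip p = true) :
    (allowedList skip)[jcnt skip p]? = some p := by
  have h26 : 26 - p = (25 - p) + 1 := by omega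
  have hdec := allowedList_decomp skip p (by omega)
  rw [h26, List.range_succ_eq_map] at hdec
  simp only [List.map_cons, List.map_map, List.filter_cons] at hdec
  rw [hdec]
  have hlen : ((List.range p).filter (aP skip)).length = jcnt skip p := rfl
  simp only [Nat.add_zero, hP, if_pos]
  rw [← hlen, List.getElem?_append_right (Nat.le_refl _), Nat.sub_self]
  rfl

lemma jcnt_lt_of_aP (skip : String) (p : Nat) (hp : p < 26) (hP : aP skip p = true) :
    jcnt skip p < (allowedList skip).length := by
  have h := jcnt_le skip (p + 1) (by omega)
  rw [jcnt_succ] at h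
  simp only [hP, if_pos] at h
  omega

lemma allowedList_length_pos (skip : String) (q : Nat) (hq : q < 26) (hP : aP skip q = true) :
    0 < (allowedList skip).length := by
  have := jcnt_lt_of_aP skip q hq hP
  omega

-- FVal transition laws ------------------------------------------------------

lemma FVal_base (skip : String) (p : Nat) (hp : p < 26) (hP : aP skip p = true) :
    FVal skip p 1 = p := by
  unfold FVal
  have hlt := jcnt_lt_of_aP skip p hp hP
  rw [Nat.add_sub_cancel, Nat.mod_eq_of_lt hlt, allowedList_get_jcnt skip p hp hP]
  rfl

lemma FVal_step_allowed (skip : String) (p k : Nat) (hp : p < 26) (hk : 2 ≤ k)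
    (hP : aP skip p = true) :
    FVal skip ((p + 1) % 26) (k - 1) = FVal skip p k := by
  unfold FVal
  have hm : 0 < (allowedList skip).length := allowedList_length_pos skip p hp hP
  congr 1
  by_cases h25 : p = 25
  · subst h25
    have h0 : (25 + 1) % 26 = 0 := by norm_num
    rw [h0]
    have hj : jcnt skip 25 + 1 = (allowedList skip).length := by
      have h := jcnt_26 skip
      rw [show (26 : Nat) = 25 + 1 from rfl, jcnt_succ] at h
      simp only [hP, if_pos] at h
      omega
    have h1 : jcnt skip 0 + (k - 1) - 1 = k - 2 := by
      unfold jcnt; simp; omega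
    have h2 : jcnt skip 25 + k - 1 = (allowedList skip).length + (k - 2) := by omega
    rw [h1, h2, Nat.add_mod_left]
  · have hmod : (p + 1) % 26 = p + 1 := Nat.mod_eq_of_lt (by omega)
    rw [hmod, jcnt_succ]
    simp only [hP, if_pos]
    have h3 : jcnt skip p + 1 + (k - 1) - 1 = jcnt skip p + k - 1 := by omega
    rw [h3]

lemma FVal_step_skipped (skip : String) (p k : Nat) (hp : p < 26) (hk : 1 ≤ k)
    (hP : aP skip p = false) :
    FVal skip ((p + 1) % 26) k = FVal skip p k := by
  unfold FVal
  congr 1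
  by_cases h25 : p = 25
  · subst h25
    have h0 : (25 + 1) % 26 = 0 := by norm_num
    rw [h0]
    have hj : jcnt skip 25 = (allowedList skip).length := by
      have h := jcnt_26 skip
      rw [show (26 : Nat) = 25 + 1 from rfl, jcnt_succ] at h
      simp only [hP, Bool.false_eq_true, if_false] at h
      omega
    have h1 : jcnt skip 0 + k - 1 = k - 1 := by
      unfold jcnt; simp
    have h2 : jcnt skip 25 + k - 1 = (allowedList skip).length + (k - 1) := by omega
    rw [h1, h2, Nat.add_mod_left]
  · have hmod : (p + 1) % 26 = p + 1 := Nat.mod_eq_of_lt (by omega)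
    rw [hmod, jcnt_succ]
    simp [hP]

-- distance to the next allowed position ------------------------------------

abbrev distQ (skip : String) (p t : Nat) : Prop := aP skip ((p + t) % 26) = true

lemma distQ_ex (skip : String) (p : Nat) (hp : p < 26)
    (q : Nat) (hq : q < 26) (hP : aP skip q = true) : ∃ t, distQ skip p t := by
  refine ⟨(q + 26 - p) % 26, ?_⟩
  unfold distQ
  have h : (p + (q + 26 - p) % 26) % 26 = q := by omega
  rw [h]; exact hP

lemma find_dist_congr (skip : String) {p p' : Nat} (hpp : p = p')
    (h : ∃ t, distQ skip p t) (h' : ∃ t, distQ skip p' t) :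
    Nat.find h = Nat.find h' := by subst hpp; rfl

lemma dist_le_25 (skip : String) (p : Nat) (_hp : p < 26) (h : ∃ t, distQ skip p t) :
    Nat.find h ≤ 25 := by
  obtain ⟨t, ht⟩ := h
  have ht' : distQ skip p (t % 26) := by
    unfold distQ at ht ⊢
    have heq : (p + t % 26) % 26 = (p + t) % 26 := by omega
    rw [heq]; exact ht
  exact le_trans (Nat.find_le ht') (by omega)

lemma dist_zero_of_aP (skip : String) (p : Nat) (hp : p < 26) (hP : aP skip p = true)
    (h : ∃ t, distQ skip p t) : Nat.find h = 0 := by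
  rw [Nat.find_eq_zero]
  unfold distQ
  rw [Nat.add_zero, Nat.mod_eq_of_lt hp]
  exact hP

lemma dist_succ_of_not_aP (skip : String) (p : Nat) (hp : p < 26) (hP : aP skip p = false)
    (h : ∃ t, distQ skip p t) (h' : ∃ t, distQ skip ((p + 1) % 26) t) :
    Nat.find h = Nat.find h' + 1 := by
  have hcong : ∀ t : Nat, distQ skip p (t + 1) ↔ distQ skip ((p + 1) % 26) t := by
    intro t
    unfold distQ
    have heq : (p + (t + 1)) % 26 = ((p + 1) % 26 + t) % 26 := by omega
    rw [heq]
  rw [Nat.find_eq_iff]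
  constructor
  · rw [hcong]; exact Nat.find_spec h'
  · intro m hm
    match m with
    | 0 =>
      unfold distQ
      rw [Nat.add_zero, Nat.mod_eq_of_lt hp, hP]
      simp
    | m' + 1 =>
      rw [hcong]
      exact Nat.find_min h' (by omega)

-- the main loop invariant ----------------------------------------------------

lemma loopA_eq (skip : String) (index : Int)
    (q0 : Nat) (hq0 : q0 < 26) (hP0 : aP skip q0 = true) :
    ∀ (fuel : Nat) (ch : Char) (i : Int) (k : Nat), 1 ≤ k → i + k = index →
      26 * (k - 1) + Nat.find (distQ_ex skip (pPos ch) (pPos_lt ch) q0 hq0 hP0) + 1 ≤ fuel →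
      loopA skip index ch i fuel = Char.ofNat (FVal skip (pPos ch) k + 97) := by
  intro fuel
  induction fuel with
  | zero => intro ch i k hk hik hfuel; omega
  | succ f ih =>
    intro ch i k hk hik hfuel
    have hp := pPos_lt ch
    have hshift : pPos (pyShift ch) = (pPos ch + 1) % 26 := by
      rw [pyShift_eq]; exact pPos_ofNat_letter _ hp
    have hd'eq : Nat.find (distQ_ex skip (pPos (pyShift ch)) (pPos_lt (pyShift ch)) q0 hq0 hP0)
        = Nat.find (distQ_ex skip ((pPos ch + 1) % 26) (Nat.mod_lt _ (by omega)) q0 hq0 hP0) :=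
      find_dist_congr skip hshift _ _
    show (let ch' := pyShift ch;
          let i' := if PySem.Chars.isIn [ch'] skip.toList then i else i + 1;
          if i' = index then ch' else loopA skip index ch' i' f)
        = Char.ofNat (FVal skip (pPos ch) k + 97)
    by_cases hA : aP skip (pPos ch) = true
    · -- the successor letter is allowed: the counter increments
      have hisIn : PySem.Chars.isIn [pyShift ch] skip.toList = false := by
        unfold aP at hA
        rw [pyShift_eq]
        simpa using hA
      simp only [hisIn, Bool.false_eq_true, if_false]
      by_cases hk1 : k = 1
      · subst hk1
        have hi1 : i + 1 = index := by omega
        rw [if_pos hi1, pyShift_eq, FVal_base skip (pPos ch) hp hA]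
      · have hne : ¬ (i + 1 = index) := by omega
        rw [if_neg hne]
        have hd0 : Nat.find (distQ_ex skip (pPos ch) (pPos_lt ch) q0 hq0 hP0) = 0 :=
          dist_zero_of_aP skip (pPos ch) hp hA _
        have hd' : Nat.find (distQ_ex skip (pPos (pyShift ch)) (pPos_lt (pyShift ch)) q0 hq0 hP0) ≤ 25 :=
          dist_le_25 skip _ (pPos_lt (pyShift ch)) _
        have hrec := ih (pyShift ch) (i + 1) (k - 1) (by omega) (by omega) (by omega)
        rw [hrec, hshift, FVal_step_allowed skip (pPos ch) k hp (by omega) hA]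
    · -- the successor letter is in skip: the counter is unchanged
      have hA' : aP skip (pPos ch) = false := by
        cases h : aP skip (pPos ch) with
        | false => rfl
        | true => exact absurd h hA
      have hisIn : PySem.Chars.isIn [pyShift ch] skip.toList = true := by
        unfold aP at hA'
        rw [pyShift_eq]
        simpa using hA'
      simp only [hisIn, if_true]
      have hne : ¬ (i = index) := by omega
      rw [if_neg hne]
      have hdist : Nat.find (distQ_ex skip (pPos ch) (pPos_lt ch) q0 hq0 hP0)
          = Nat.find (distQ_ex skip ((pPos ch + 1) % 26) (Nat.mod_lt _ (by omega)) q0 hq0 hP0) + 1 :=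
        dist_succ_of_not_aP skip (pPos ch) hp hA' _ _
      have hrec := ih (pyShift ch) i k hk hik (by omega)
      rw [hrec, hshift, FVal_step_skipped skip (pPos ch) k hp hk hA']

-- the per-character value computed by B's port equals Char.ofNat (FVal … + 97)
lemma alt_char_eq (skip : String) (index : Int) (hidx : 1 ≤ index) (ch : Char) :
    Char.ofNat ((PySem.List.pyGet? (allowedList skip)
        (PySem.Int.mod
          ((((allowedList skip).filter (fun q : Nat =>
              decide ((q : Int) < PySem.Int.mod ((ch.toNat : Int) + 1 - 97) 26))).length : Int)
            + index - 1)
          ((allowedList skip).length : Int))).getD 0 + 97)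
      = Char.ofNat (FVal skip (pPos ch) index.toNat + 97) := by
  have hp := pPos_lt ch
  have hmod_eq : PySem.Int.mod ((ch.toNat : Int) + 1 - 97) 26 = ((pPos ch : Nat) : Int) := by
    unfold pPos
    have h1 := PySem.Int.mod_nonneg ((ch.toNat : Int) + 1 - 97) (b := 26) (by omega)
    omega
  rw [hmod_eq]
  have hfil : (allowedList skip).filter (fun q : Nat => decide ((q : Int) < ((pPos ch : Nat) : Int)))
      = (List.range (pPos ch)).filter (aP skip) := by
    have hcast : (fun q : Nat => decide ((q : Int) < ((pPos ch : Nat) : Int)))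
        = (fun q : Nat => decide (q < pPos ch)) := by
      funext q; simp
    rw [hcast, allowedList_decomp skip (pPos ch) (by omega), List.filter_append]
    have h1 : ((List.range (pPos ch)).filter (aP skip)).filter (fun q => decide (q < pPos ch))
        = (List.range (pPos ch)).filter (aP skip) := by
      rw [List.filter_eq_self]
      intro a ha
      have := List.mem_range.mp (List.mem_of_mem_filter ha)
      simp [this]
    have h2 : (((List.range (26 - pPos ch)).map (pPos ch + ·)).filter (aP skip)).filter
        (fun q => decide (q < pPos ch)) = [] := by
      rw [List.filter_eq_nil_iff]
      intro a ha
      have ha' := List.mem_of_mem_filter ha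
      obtain ⟨b, _, hb⟩ := List.mem_map.mp ha'
      simp [← hb]
    rw [h1, h2, List.append_nil]
  rw [hfil]
  have hlenfil : (((List.range (pPos ch)).filter (aP skip)).length : Int)
      = ((jcnt skip (pPos ch) : Nat) : Int) := by
    unfold jcnt; norm_num
  rw [hlenfil]
  have hargs : (((jcnt skip (pPos ch) : Nat) : Int) + index - 1)
      = ((jcnt skip (pPos ch) + index.toNat - 1 : Nat) : Int) := by
    omega
  rw [hargs]
  rw [PySem.Int.mod_natCast, PySem.List.pyGet?_natCast]
  rfl

-- the fold over the string is a map
lemma fold_eq_map {β : Type} (f : Char → β) (l : List Char) :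
    l.foldl (fun acc ch => acc ++ [f ch]) [] = l.map f := by
  simpa using PySem.List.foldl_append_singleton_eq_map (f := f) (l := l) []

-- ===== VERDICT (by name: the statement is the Claim_ definition above) =====
theorem solution_0_spec : Claim_equal_solution_0 := by
  intro s skip index _hdom hpre
  unfold Spec_solution_0
  rcases hpre with hs | ⟨hidx, q0, hq0mem, hq0notin⟩
  · subst hs
    simp [solution_0, solution_0_alt]
  · have hq0 : q0 < 26 := List.mem_range.mp hq0mem
    have hP0 : aP skip q0 = true := (aP_iff skip q0).mpr hq0notin
    simp only [solution_0, solution_0_alt]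
    rw [fold_eq_map, fold_eq_map]
    refine congrArg String.mk (congrArg (PySem.Chars.join []) (congrArg (List.map _) ?_))
    apply List.map_congr_left
    intro ch _
    have hk : (1 : Nat) ≤ index.toNat := by omega
    have hik : (0 : Int) + (index.toNat : Nat) = index := by omega
    have hd := dist_le_25 skip (pPos ch) (pPos_lt ch)
      (distQ_ex skip (pPos ch) (pPos_lt ch) q0 hq0 hP0)
    have hfuel : 26 * (index.toNat - 1)
        + Nat.find (distQ_ex skip (pPos ch) (pPos_lt ch) q0 hq0 hP0) + 1
        ≤ 26 * index.toNat + 26 := by omega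
    rw [loopA_eq skip index q0 hq0 hP0 (26 * index.toNat + 26) ch 0 index.toNat hk hik hfuel]
    exact (alt_char_eq skip index hidx ch).symm
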